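-- pv_equiv track=rewrite | github.com/gabrielamendezg/Motor-busqueda-archivos | tp2.py | busqueda_or
-- ===== SOURCE A (Python) =====
-- def busqueda_or(busqueda,indice):
-- 	"""
-- 	Recibe una lista con los terminos de busqueda y un diccionario de
-- 	los terminos en los archivos y sus direcciones. Devuelve una lista
-- 	con las direcciones que contienen alguno de los terminos de busqueda.
-- 	"""
-- 	rutas=[]
-- 	for termino in busqueda:
-- 		if termino in indice:
-- 			for direccion in indice[termino]:
-- 				if not direccion in rutas:
-- 					rutas.append(direccion)
-- 	return rutas
-- ===== SOURCE B (Python) =====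
-- def busqueda_or(busqueda, indice):
--     """Worklist algorithm: gather every matching address into one pending
--     list, then repeatedly emit the first pending address and filter all of
--     its later duplicates out of the worklist (no membership test against
--     the growing result)."""
--     pending = []
--     for termino in busqueda:
--         pending += indice.get(termino, [])
--     rutas = []
--     while pending:
--         head = pending[0]
--         rutas.append(head)
--         pending = [direccion for direccion in pending if direccion != head]
--     return rutas
-- ===== Notes on version B (the rewrite author's own statement) =====
-- stated objective: alternative
-- what changed: A interleaves the gather loop with an inline 'not in rutas' membership scan of the growing result; B gathers all postings into a worklist and then dedups by repeatedly emitting the worklist's head and filtering its remaining duplicates out of the worklist, never testing membership in the result.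
import Mathlib
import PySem

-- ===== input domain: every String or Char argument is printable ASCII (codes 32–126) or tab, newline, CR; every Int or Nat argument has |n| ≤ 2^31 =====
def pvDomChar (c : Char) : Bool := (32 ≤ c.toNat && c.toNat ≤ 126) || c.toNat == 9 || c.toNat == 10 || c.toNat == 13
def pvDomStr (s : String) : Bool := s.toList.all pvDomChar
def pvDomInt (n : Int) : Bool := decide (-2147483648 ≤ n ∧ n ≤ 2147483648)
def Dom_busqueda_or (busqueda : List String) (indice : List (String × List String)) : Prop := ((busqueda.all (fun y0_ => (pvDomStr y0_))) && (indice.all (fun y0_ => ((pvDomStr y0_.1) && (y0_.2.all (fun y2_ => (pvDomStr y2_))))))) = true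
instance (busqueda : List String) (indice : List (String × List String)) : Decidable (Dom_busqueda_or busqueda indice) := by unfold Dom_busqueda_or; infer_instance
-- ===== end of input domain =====

-- B replaces A's interleaved nested loop (membership scan of the growing result)
-- by a worklist algorithm: gather all postings, then repeatedly emit the head and
-- filter its later duplicates out of the worklist (alternative decomposition).

-- ===== PORT A =====
def busqueda_or (busqueda : List String) (indice : List (String × List String)) : List String :=
  let d := PySem.Dict.ofList indice
  busqueda.foldl
    (fun rutas termino =>
      if d.contains termino then
        (d.getD termino []).foldl
          (fun rutas direccion =>
            if direccion ∈ rutas then rutas else rutas ++ [direccion])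
          rutas
      else rutas)
    []

-- ===== PORT B =====
-- the while loop of Source B: emit head, filter it out of the whole worklist
def uniqLoop : List String → List String
  | [] => []
  | h :: t => h :: uniqLoop ((h :: t).filter (fun x => x != h))
termination_by l => l.length
decreasing_by
  simp only [List.filter_cons, bne_self_eq_false, List.length_cons]
  exact Nat.lt_succ_of_le (List.length_filter_le _ _)

def busqueda_or_alt (busqueda : List String) (indice : List (String × List String)) : List String :=
  let d := PySem.Dict.ofList indice
  let pending := busqueda.foldl (fun acc termino => acc ++ d.getD termino []) []
  uniqLoop pending

-- ===== PRECONDITION & SPEC =====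
def Spec_busqueda_or (busqueda : List String) (indice : List (String × List String)) (out : List String) : Prop := out = busqueda_or_alt busqueda indice
instance (busqueda : List String) (indice : List (String × List String)) (out : List String) : Decidable (Spec_busqueda_or busqueda indice out) := by unfold Spec_busqueda_or; infer_instance

-- ===== CLAIM (what is proved, stated in full; the proofs are below) =====
def Claim_equal_busqueda_or : Prop := ∀ (busqueda : List String) (indice : List (String × List String)), Dom_busqueda_or busqueda indice → Spec_busqueda_or busqueda indice (busqueda_or busqueda indice)

-- ===== LEMMAS AND PROOFS =====

-- A's inner append-if-absent step is exactly PySem.Set.add.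
theorem step_eq_add (rutas : List String) (x : String) :
    (if x ∈ rutas then rutas else rutas ++ [x]) = PySem.Set.add rutas x := by
  simp [PySem.Set.add, PySem.Set.contains]

-- A's outer loop, started from any accumulator, is Set.update by the gathered list.
theorem loop_eq_update (d : PySem.Dict String (List String)) (busqueda : List String)
    (s : List String) :
    busqueda.foldl
      (fun rutas termino =>
        if d.contains termino then
          (d.getD termino []).foldl
            (fun rutas direccion =>
              if direccion ∈ rutas then rutas else rutas ++ [direccion])
            rutas
        else rutas) s
    = PySem.Set.update s (busqueda.foldl (fun acc termino => acc ++ d.getD termino []) []) := by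
  have hflat : ∀ (l : List String) (acc : List String),
      l.foldl (fun acc termino => acc ++ d.getD termino []) acc
        = acc ++ l.flatMap (fun termino => d.getD termino []) := by
    intro l
    induction l with
    | nil => intro acc; simp
    | cons t rest ih => intro acc; simp [ih, List.flatMap_cons]
  rw [hflat]
  simp only [List.nil_append]
  induction busqueda generalizing s with
  | nil => simp [PySem.Set.update]
  | cons t rest ih =>
    simp only [List.foldl_cons, List.flatMap_cons, PySem.Set.update, List.foldl_append]
    have hf : (fun (rutas : List String) (x : String) =>
        if x ∈ rutas then rutas else rutas ++ [x]) = PySem.Set.add := by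
      funext r x; exact step_eq_add r x
    by_cases h : d.contains t = true
    · rw [if_pos h, ih, hf]; rfl
    · rw [if_neg h, ih]
      have hg : d.getD t [] = [] := PySem.Dict.getD_of_not_contains _ _ (by simpa using h)
      simp [hg, PySem.Set.update]

-- updating past elements already in the set can be filtered away
theorem update_filter (h : String) : ∀ (t s : List String), h ∈ s →
    PySem.Set.update s t = PySem.Set.update s (t.filter (fun x => x != h)) := by
  intro t
  induction t with
  | nil => intro s _; rfl
  | cons a t ih =>
    intro s hs
    by_cases hah : a = h
    · subst hah
      have : PySem.Set.add s a = s := by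
        simp [PySem.Set.add, PySem.Set.contains, hs]
      simp only [List.filter_cons, bne_self_eq_false, PySem.Set.update, List.foldl_cons, this]
      exact ih s hs
    · have hb : (a != h) = true := by simp [bne, hah]
      simp only [List.filter_cons, hb, PySem.Set.update, List.foldl_cons]
      apply ih
      simp [PySem.Set.add]
      split <;> simp [hs]

-- prepending a fresh head to the accumulator commutes with Set.update
theorem update_cons (h : String) : ∀ (t s : List String), h ∉ t →
    PySem.Set.update (h :: s) t = h :: PySem.Set.update s t := by
  intro t
  induction t with
  | nil => intro s _; rfl
  | cons a t ih =>
    intro s hn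
    have hah : a ≠ h := fun e => hn (by simp [e])
    have hm : (a ∈ h :: s) ↔ (a ∈ s) := by simp [hah]
    simp only [PySem.Set.update, List.foldl_cons]
    have hadd : PySem.Set.add (h :: s) a = h :: PySem.Set.add s a := by
      simp only [PySem.Set.add, PySem.Set.contains, List.contains_iff_mem, hm]
      split <;> simp
    rw [hadd]
    exact ih _ (fun e => hn (by simp [e]))

-- Source B's worklist loop computes exactly set-of-list (first occurrences in order)
theorem uniqLoop_eq_ofList : ∀ (xs : List String), uniqLoop xs = PySem.Set.ofList xs := by
  intro xs
  induction xs using uniqLoop.induct with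
  | case1 => simp [uniqLoop]
  | case2 h t ih =>
    rw [uniqLoop, ih]
    have h1 : PySem.Set.ofList (h :: t) = PySem.Set.update [h] t := by
      simp [PySem.Set.ofList_eq_foldl, PySem.Set.update, PySem.Set.add, PySem.Set.contains]
    have h2 : (h :: t).filter (fun x => x != h) = t.filter (fun x => x != h) := by
      simp
    rw [h1, update_filter h t [h] (by simp), h2,
        update_cons h _ [] (by simp [List.mem_filter])]
    simp [PySem.Set.update, PySem.Set.ofList_eq_foldl]

-- ===== VERDICT (by name: the statement is the Claim_ definition above) =====
theorem busqueda_or_spec : Claim_equal_busqueda_or := by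
  intro busqueda indice _
  unfold Spec_busqueda_or busqueda_or busqueda_or_alt
  rw [loop_eq_update, uniqLoop_eq_ofList]
  rfl
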